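-- pv_equiv track=rewrite | github.com/KaiserYury2004/Classic-cryptosystems | ciphers.py | permutation_cipher
-- ===== SOURCE A (Python) =====
-- def permutation_cipher(text, key, alphabet, encrypt=True):
--     """Функция шифрования/расшифрования шифром перестановки"""
--     m = len(alphabet)
--     key_length = len(key)
--
--     if len(set(key)) != key_length:
--         raise ValueError("Ключ должен состоять из попарно различных символов алфавита.")
--
--     key_order = sorted(range(key_length), key=lambda x: alphabet.index(key[x]))
--
--     original_length = len(text)
--     if len(text) % key_length != 0:
--         padding_length = key_length - (len(text) % key_length)
--         text += alphabet[len(alphabet)-1] * padding_length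
--
--     result = []
--     for i in range(0, len(text), key_length):
--         block = text[i:i+key_length]
--
--         if encrypt:
--             result_block = ''.join([block[key_order[j]] for j in range(key_length)])
--         else:
--             result_block = [''] * key_length
--             for j in range(key_length):
--                 result_block[key_order[j]] = block[j]
--             result_block = ''.join(result_block)
--
--         result.append(result_block)
--     decrypted_text = ''.join(result)
--     if not encrypt:
--         decrypted_text = decrypted_text[:original_length]
--
--     return decrypted_text
-- ===== SOURCE B (Python) =====
-- def permutation_cipher(text, key, alphabet, encrypt=True):
--     """Columnar permutation cipher via one precomputed position map and flat indexing."""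
--     key_length = len(key)
--
--     if len(set(key)) != key_length:
--         raise ValueError("Ключ должен состоять из попарно различных символов алфавита.")
--
--     key_order = sorted(range(key_length), key=lambda x: alphabet.index(key[x]))
--
--     original_length = len(text)
--     if len(text) % key_length != 0:
--         text += alphabet[len(alphabet) - 1] * (key_length - len(text) % key_length)
--
--     if encrypt:
--         perm = key_order
--     else:
--         perm = [0] * key_length
--         for j in range(key_length):
--             perm[key_order[j]] = j
--
--     out = ''.join(text[(p // key_length) * key_length + perm[p % key_length]]
--                   for p in range(len(text)))
--     return out if encrypt else out[:original_length]
-- ===== Notes on version B (the rewrite author's own statement) =====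
-- stated objective: alternative
-- what changed: Replaces A's per-block slicing with its in-loop encrypt/decrypt branch (and the imperative scatter-assignment per decrypt block) by precomputing one position map once (key_order, or its inverse for decrypt) and producing the whole output in a single flat pass with arithmetic indexing text[(p//k)*k + perm[p%k]].
import Mathlib
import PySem

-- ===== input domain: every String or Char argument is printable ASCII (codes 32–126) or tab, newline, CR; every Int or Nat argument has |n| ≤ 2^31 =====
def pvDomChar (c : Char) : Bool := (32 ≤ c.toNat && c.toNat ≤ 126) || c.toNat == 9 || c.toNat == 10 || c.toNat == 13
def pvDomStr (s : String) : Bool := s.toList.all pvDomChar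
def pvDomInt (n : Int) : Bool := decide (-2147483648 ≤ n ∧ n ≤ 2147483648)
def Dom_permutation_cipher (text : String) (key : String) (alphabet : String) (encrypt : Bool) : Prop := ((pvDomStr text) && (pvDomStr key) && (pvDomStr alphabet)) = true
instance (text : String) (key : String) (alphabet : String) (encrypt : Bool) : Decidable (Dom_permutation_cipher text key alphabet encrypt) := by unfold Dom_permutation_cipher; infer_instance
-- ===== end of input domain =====

-- B replaces A's block slicing with its in-loop encrypt/decrypt branch by one precomputed
-- position map (key_order, or its inverse for decrypt) and a single flat indexing pass
-- (objective: alternative, same asymptotic cost).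

-- ===== PORT A =====
-- key_order = sorted(range(key_length), key=lambda x: alphabet.index(key[x]))
-- (this very line occurs in both Pythons; alphabet.index is Chars.find — identical where
-- .index does not raise, and Pre_ restricts to key characters present in alphabet)
def pvKeyOrder (ks al : List Char) : List Int :=
  PySem.List.sorted (PySem.List.pyRange 0 (ks.length : Int) 1)
    (fun x => PySem.Chars.find al [PySem.List.pyGetD ks x ' ']) false

-- the padding step, also textually identical in both Pythons
def pvPad (t0 al : List Char) (k origLen : Int) : List Char :=
  if PySem.Int.mod origLen k ≠ 0 then
    t0 ++ PySem.List.pyRepeat [PySem.List.pyGetD al ((al.length : Int) - 1) ' ']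
            (k - PySem.Int.mod origLen k)
  else t0

-- Port of A. The Python raises on duplicate key characters (ValueError), on a key character
-- absent from alphabet (ValueError from .index), and on an empty key (ZeroDivisionError);
-- the port returns "" on its guard branches — all such inputs are outside Pre_.
-- A's decrypt block starts from ['']*key_length; every slot is overwritten (key_order is a
-- permutation of range(key_length)), so the Char placeholder ' ' is unobservable.
def permutation_cipher (text : String) (key : String) (alphabet : String) (encrypt : Bool) : String :=
  let ks := key.toList
  let al := alphabet.toList
  let keyLength : Int := (ks.length : Int)
  if PySem.Set.len (PySem.Set.ofList ks) ≠ keyLength then "" else  -- raise ValueError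
  let keyOrder := pvKeyOrder ks al
  let originalLength : Int := (text.toList.length : Int)
  if keyLength = 0 then "" else  -- len(text) % 0 → ZeroDivisionError
  let t := pvPad text.toList al keyLength originalLength
  let result := (PySem.List.pyRange 0 (t.length : Int) keyLength).foldl (fun acc i =>
      let block := PySem.List.slice t (some i) (some (i + keyLength))
      let rb : List Char :=
        if encrypt then
          (PySem.List.pyRange 0 keyLength 1).map
            (fun j => PySem.List.pyGetD block (PySem.List.pyGetD keyOrder j 0) ' ')
        else
          (PySem.List.pyRange 0 keyLength 1).foldl
            (fun rb j => PySem.List.pySetD rb (PySem.List.pyGetD keyOrder j 0)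
                           (PySem.List.pyGetD block j ' '))
            (List.replicate keyLength.toNat ' ')
      acc ++ rb) []
  if encrypt then String.mk result
  else String.mk (PySem.List.slice result none (some originalLength))

-- ===== PORT B =====
def permutation_cipher_alt (text : String) (key : String) (alphabet : String) (encrypt : Bool) : String :=
  let ks := key.toList
  let al := alphabet.toList
  let keyLength : Int := (ks.length : Int)
  if PySem.Set.len (PySem.Set.ofList ks) ≠ keyLength then "" else  -- raise ValueError
  let keyOrder := pvKeyOrder ks al
  let originalLength : Int := (text.toList.length : Int)
  if keyLength = 0 then "" else  -- len(text) % 0 → ZeroDivisionError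
  let t := pvPad text.toList al keyLength originalLength
  let perm : List Int :=
    if encrypt then keyOrder
    else (PySem.List.pyRange 0 keyLength 1).foldl
           (fun acc j => PySem.List.pySetD acc (PySem.List.pyGetD keyOrder j 0) j)
           (List.replicate keyLength.toNat 0)
  let out := (PySem.List.pyRange 0 (t.length : Int) 1).map (fun p =>
      PySem.List.pyGetD t
        (PySem.Int.floordiv p keyLength * keyLength +
          PySem.List.pyGetD perm (PySem.Int.mod p keyLength) 0) ' ')
  if encrypt then String.mk out
  else String.mk (PySem.List.slice out none (some originalLength))

-- ===== PRECONDITION & SPEC =====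
-- Pre_ is exactly where the Python A returns normally: nonempty key (else ZeroDivisionError),
-- pairwise-distinct key characters (else ValueError), each present in alphabet (else
-- ValueError from alphabet.index).
def Pre_permutation_cipher (text : String) (key : String) (alphabet : String) (encrypt : Bool) : Prop :=
  key.toList ≠ [] ∧ key.toList.Nodup ∧ (key.toList.all (alphabet.toList.contains ·)) = true
instance (text : String) (key : String) (alphabet : String) (encrypt : Bool) : Decidable (Pre_permutation_cipher text key alphabet encrypt) := by unfold Pre_permutation_cipher; infer_instance

def pvWitness_permutation_cipher : String × String × String × Bool := ("hi", "ba", "ab", true)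

def Spec_permutation_cipher (text : String) (key : String) (alphabet : String) (encrypt : Bool) (out : String) : Prop := out = permutation_cipher_alt text key alphabet encrypt
instance (text : String) (key : String) (alphabet : String) (encrypt : Bool) (out : String) : Decidable (Spec_permutation_cipher text key alphabet encrypt out) := by unfold Spec_permutation_cipher; infer_instance

-- ===== CLAIM (what is proved, stated in full; the proofs are below) =====
def Claim_equal_permutation_cipher : Prop := ∀ (text : String) (key : String) (alphabet : String) (encrypt : Bool), Dom_permutation_cipher text key alphabet encrypt → Pre_permutation_cipher text key alphabet encrypt → Spec_permutation_cipher text key alphabet encrypt (permutation_cipher text key alphabet encrypt)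

-- ===== LEMMAS AND PROOFS =====

-- generic scatter-assignment fold: write value pv.2 at position pv.1
def pvSetFold {γ : Type} (ps : List (Nat × γ)) (init : List γ) : List γ :=
  ps.foldl (fun acc pv => acc.set pv.1 pv.2) init

theorem pvSetFold_length {γ : Type} (ps : List (Nat × γ)) (init : List γ) :
    (pvSetFold ps init).length = init.length := by
  induction ps generalizing init with
  | nil => rfl
  | cons p rest ih => simpa [pvSetFold] using ih (init.set p.1 p.2)

theorem pvSetFold_getElem?_not_mem {γ : Type} (ps : List (Nat × γ)) (init : List γ) (q : Nat)
    (hq : q ∉ ps.map Prod.fst) : (pvSetFold ps init)[q]? = init[q]? := by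
  induction ps generalizing init with
  | nil => rfl
  | cons p rest ih =>
      simp only [List.map_cons, List.mem_cons, not_or] at hq
      rw [pvSetFold, List.foldl_cons, ← pvSetFold, ih _ hq.2,
        List.getElem?_set_ne (by exact fun h => hq.1 h.symm)]

theorem pvSetFold_getElem? {γ : Type} (ps : List (Nat × γ)) (init : List γ) (q : Nat) (v : γ)
    (hnd : (ps.map Prod.fst).Nodup) (hm : (q, v) ∈ ps) (hq : q < init.length) :
    (pvSetFold ps init)[q]? = some v := by
  induction ps generalizing init with
  | nil => cases hm
  | cons p rest ih =>
      simp only [List.map_cons, List.nodup_cons] at hnd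
      rcases List.mem_cons.1 hm with h | h
      · subst h
        rw [pvSetFold, List.foldl_cons, ← pvSetFold,
          pvSetFold_getElem?_not_mem _ _ _ hnd.1,
          List.getElem?_set_self (by simpa using hq)]
      · exact ih _ hnd.2 h (by simpa using hq)

-- key_order is a permutation of range(key_length)
theorem pvKeyOrder_perm (ks al : List Char) :
    (pvKeyOrder ks al).Perm (PySem.List.pyRange 0 (ks.length : Int) 1) :=
  PySem.List.sorted_perm _ _ _

theorem pvKeyOrder_length (ks al : List Char) : (pvKeyOrder ks al).length = ks.length := by
  have := (pvKeyOrder_perm ks al).length_eq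
  simpa [PySem.List.length_pyRange_one] using this

theorem pvKeyOrder_mem (ks al : List Char) {x : Int} (hx : x ∈ pvKeyOrder ks al) :
    0 ≤ x ∧ x < (ks.length : Int) := by
  have := (pvKeyOrder_perm ks al).mem_iff.1 hx
  simpa [PySem.List.mem_pyRange_one] using this

theorem pvKeyOrder_nodup (ks al : List Char) : (pvKeyOrder ks al).Nodup :=
  ((pvKeyOrder_perm ks al).nodup_iff).2 (PySem.List.nodup_pyRange_one _ _)

theorem pvKeyOrder_surj (ks al : List Char) {q : Nat} (hq : q < ks.length) :
    (q : Int) ∈ pvKeyOrder ks al := by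
  refine (pvKeyOrder_perm ks al).mem_iff.2 ?_
  rw [PySem.List.mem_pyRange_one]
  omega

-- padded length is a multiple of the key length
theorem pvPad_length (t0 al : List Char) (k : Nat) (hk : 0 < k) :
    ∃ n : Nat, (pvPad t0 al (k : Int) (t0.length : Int)).length = n * k := by
  unfold pvPad
  rw [PySem.Int.mod_natCast]
  by_cases h : t0.length % k = 0
  · refine ⟨t0.length / k, ?_⟩
    simp [h, Nat.div_mul_cancel (Nat.dvd_of_mod_eq_zero h)]
  · refine ⟨t0.length / k + 1, ?_⟩
    have hmlt := Nat.mod_lt t0.length hk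
    have hcast : ((k : Int) - ((t0.length % k : Nat) : Int)) = ((k - t0.length % k : Nat) : Int) := by
      omega
    simp only [ne_eq, Nat.cast_eq_zero, h, not_false_iff, if_pos, hcast,
      PySem.List.pyRepeat_singleton, List.length_append, List.length_replicate, Int.toNat_natCast]
    have h2 := Nat.div_add_mod t0.length k
    have h3 : (t0.length / k + 1) * k = k * (t0.length / k) + k := by ring
    omega

-- range with step k over n*k elements enumerates the block starts
theorem pyRange_step_blocks (n k : Nat) (hk : 0 < k) :
    PySem.List.pyRange 0 ((n * k : Nat) : Int) (k : Int)
      = (List.range n).map (fun b => ((b * k : Nat) : Int)) := by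
  rw [PySem.List.pyRange_of_pos 0 _ (by exact_mod_cast hk)]
  have hc1 : ((n * k : Nat) : Int) - 0 + (k : Int) - 1 = ((n * k + k - 1 : Nat) : Int) := by
    push_cast; omega
  have hc2 : (((n * k + k - 1 : Nat) : Int) / (k : Int)).toNat = n := by
    rw [← Int.natCast_div, Int.toNat_natCast]
    have e1 : n * k + k - 1 = k * n + (k - 1) := by rw [Nat.mul_comm]; omega
    rw [e1, Nat.mul_add_div hk, Nat.div_eq_of_lt (by omega)]
    omega
  by_cases hn : 0 < n
  · have hpos : (0 : Int) < ((n * k : Nat) : Int) := by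
      have : 0 < n * k := Nat.mul_pos hn hk
      exact_mod_cast this
    rw [if_pos hpos, hc1, hc2]
    refine List.map_congr_left (fun b hb => ?_)
    push_cast
    ring
  · have hn0 : n = 0 := by omega
    subst hn0
    simp

-- the flat range over n*k positions splits into n blocks of k
theorem pyRange_flat_blocks (n k : Nat) :
    PySem.List.pyRange 0 ((n * k : Nat) : Int) 1
      = (List.range n).flatMap (fun b =>
          PySem.List.pyRange ((b * k : Nat) : Int) (((b + 1) * k : Nat) : Int) 1) := by
  induction n with
  | zero => simp [PySem.List.pyRange_one_eq_nil]
  | succ n ih =>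
      rw [List.range_succ, List.flatMap_append, ← ih]
      simp only [List.flatMap_cons, List.flatMap_nil, List.append_nil]
      rw [← PySem.List.pyRange_one_append 0 ((n * k : Nat) : Int) (((n + 1) * k : Nat) : Int)
        (by positivity) (by exact_mod_cast Nat.mul_le_mul_right k (Nat.le_succ n))]

-- one block of k positions of the flat range, as range k
theorem pyRange_block (b k : Nat) :
    PySem.List.pyRange ((b * k : Nat) : Int) (((b + 1) * k : Nat) : Int) 1
      = (List.range k).map (fun j => ((b * k + j : Nat) : Int)) := by
  rw [PySem.List.pyRange_one]
  have e : (((b + 1) * k : Nat) : Int) - ((b * k : Nat) : Int) = ((k : Nat) : Int) := by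
    push_cast; ring
  rw [e, Int.toNat_natCast]
  refine List.map_congr_left (fun j hj => ?_)
  push_cast
  ring

-- floor-div and mod of a position inside block b
theorem pv_floordiv_block (b k j : Nat) (hk : 0 < k) (hj : j < k) :
    PySem.Int.floordiv ((b * k + j : Nat) : Int) (k : Int) = (b : Int) := by
  rw [PySem.Int.floordiv_natCast]
  congr 1
  have e1 : b * k + j = k * b + j := by rw [Nat.mul_comm]
  rw [e1, Nat.mul_add_div hk, Nat.div_eq_of_lt hj]
  omega

theorem pv_mod_block (b k j : Nat) (hj : j < k) :
    PySem.Int.mod ((b * k + j : Nat) : Int) (k : Int) = (j : Int) := by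
  rw [PySem.Int.mod_natCast]
  congr 1
  have e1 : b * k + j = k * b + j := by rw [Nat.mul_comm]
  rw [e1, Nat.mul_add_mod, Nat.mod_eq_of_lt hj]

-- a scatter loop 'for j in range(k): acc[ord[j]] = w(j)' as pvSetFold
theorem pvFoldConv {γ : Type} (ord : List Int) (k : Nat) (hol : ord.length = k)
    (hbd : ∀ x ∈ ord, 0 ≤ x ∧ x < (k : Int)) (w : Int → γ) (init : List γ) :
    (PySem.List.pyRange 0 (k : Int) 1).foldl
        (fun rb j => PySem.List.pySetD rb (PySem.List.pyGetD ord j 0) (w j)) init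
      = pvSetFold ((List.range k).map (fun j => ((ord.getD j 0).toNat, w (j : Int)))) init := by
  rw [PySem.List.pyRange_zero_nat, List.foldl_map, pvSetFold, List.foldl_map]
  refine PySem.List.foldl_congr_mem _ _ _ _ ?_
  intro acc j hj
  have hj' : j < ord.length := by rw [hol]; exact List.mem_range.1 hj
  have hnn : 0 ≤ ord.getD j 0 := by
    rw [List.getD_eq_getElem _ _ hj']
    exact (hbd _ (List.getElem_mem hj')).1
  simp only [PySem.List.pyGetD_natCast]
  rw [PySem.List.pySetD_of_nonneg _ _ hnn]

-- the written positions are pairwise distinct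
theorem pv_ps_nodup {γ : Type} (ord : List Int) (k : Nat) (hol : ord.length = k)
    (hnd : ord.Nodup) (hbd : ∀ x ∈ ord, 0 ≤ x ∧ x < (k : Int)) (w : Int → γ) :
    (((List.range k).map (fun j => ((ord.getD j 0).toNat, w (j : Int)))).map Prod.fst).Nodup := by
  rw [List.map_map]
  have : (Prod.fst ∘ fun j => ((ord.getD j 0).toNat, w (j : Int)))
      = fun j => (ord.getD j 0).toNat := rfl
  rw [this]
  refine List.Nodup.map_on ?_ (List.nodup_range)
  intro x hx y hy hxy
  have hx' : x < ord.length := by rw [hol]; exact List.mem_range.1 hx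
  have hy' : y < ord.length := by rw [hol]; exact List.mem_range.1 hy
  rw [List.getD_eq_getElem _ _ hx', List.getD_eq_getElem _ _ hy'] at hxy
  have h1 := (hbd _ (List.getElem_mem hx')).1
  have h2 := (hbd _ (List.getElem_mem hy')).1
  have : ord[x] = ord[y] := by omega
  exact (hnd.getElem_inj_iff).1 this

-- every position q < k is written, by the preimage index of q under ord
theorem pv_ps_mem {γ : Type} (ord : List Int) (k : Nat) (hol : ord.length = k)
    (hsurj : ∀ q : Nat, q < k → (q : Int) ∈ ord) (w : Int → γ) (q : Nat) (hq : q < k) :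
    ∃ j : Nat, j < k ∧ ord.getD j 0 = (q : Int) ∧
      (q, w (j : Int)) ∈ (List.range k).map (fun j => ((ord.getD j 0).toNat, w (j : Int))) := by
  obtain ⟨j, hj, hje⟩ := List.mem_iff_getElem.1 (hsurj q hq)
  refine ⟨j, by omega, ?_, ?_⟩
  · rw [List.getD_eq_getElem _ _ hj, hje]
  · refine List.mem_map.2 ⟨j, List.mem_range.2 (by omega), ?_⟩
    rw [List.getD_eq_getElem _ _ hj, hje]
    simp

-- THE CORE: A's block loop and B's flat indexing pass build the same character list
theorem pvCore (t : List Char) (ord : List Int) (k n : Nat) (hk : 0 < k)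
    (ht : t.length = n * k) (hol : ord.length = k)
    (hbd : ∀ x ∈ ord, 0 ≤ x ∧ x < (k : Int)) (hnd : ord.Nodup)
    (hsurj : ∀ q : Nat, q < k → (q : Int) ∈ ord) (encrypt : Bool) :
    (PySem.List.pyRange 0 (t.length : Int) (k : Int)).foldl (fun acc i =>
        acc ++
          (if encrypt then
            (PySem.List.pyRange 0 (k : Int) 1).map
              (fun j => PySem.List.pyGetD (PySem.List.slice t (some i) (some (i + (k : Int))))
                          (PySem.List.pyGetD ord j 0) ' ')
          else
            (PySem.List.pyRange 0 (k : Int) 1).foldl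
              (fun rb j => PySem.List.pySetD rb (PySem.List.pyGetD ord j 0)
                             (PySem.List.pyGetD (PySem.List.slice t (some i) (some (i + (k : Int)))) j ' '))
              (List.replicate ((k : Int)).toNat ' '))) []
      = (PySem.List.pyRange 0 (t.length : Int) 1).map (fun p =>
          PySem.List.pyGetD t
            (PySem.Int.floordiv p (k : Int) * (k : Int) +
              PySem.List.pyGetD
                (if encrypt then ord
                 else (PySem.List.pyRange 0 (k : Int) 1).foldl
                        (fun acc j => PySem.List.pySetD acc (PySem.List.pyGetD ord j 0) j)
                        (List.replicate ((k : Int)).toNat 0))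
                (PySem.Int.mod p (k : Int)) 0) ' ') := by
  have htc : (t.length : Int) = ((n * k : Nat) : Int) := by exact_mod_cast congrArg Nat.cast ht
  rw [htc, pyRange_step_blocks n k hk, List.foldl_map,
    PySem.List.foldl_append_eq_flatMap, List.nil_append,
    pyRange_flat_blocks n k, List.map_flatMap,
    List.flatMap_def, List.flatMap_def]
  refine congrArg List.flatten (List.map_congr_left (fun b hb => ?_))
  have hbn : b < n := List.mem_range.1 hb
  rw [pyRange_block, List.map_map]
  -- the block is drop/take
  have hblock : PySem.List.slice t (some ((b * k : Nat) : Int))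
      (some (((b * k : Nat) : Int) + (k : Int))) = (t.drop (b * k)).take k :=
    PySem.List.slice_natCast_add t (b * k) k
  have hbk : b * k + k ≤ n * k := by
    calc b * k + k = (b + 1) * k := by ring
    _ ≤ n * k := Nat.mul_le_mul_right k (by omega)
  have hblen : ((t.drop (b * k)).take k).length = k := by
    simp only [List.length_take, List.length_drop, ht]
    omega
  have hblk_get : ∀ (q : Nat) (hq : q < k),
      ((t.drop (b * k)).take k)[q]'(by omega) = t[b * k + q]'(by omega) := by
    intro q hq
    rw [List.getElem_take, List.getElem_drop]
  -- the common right-hand element at offset j of block b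
  have hf : ∀ (P : List Int) (j : Nat), j < k →
      PySem.Int.floordiv ((b * k + j : Nat) : Int) (k : Int) * (k : Int) +
        PySem.List.pyGetD P (PySem.Int.mod ((b * k + j : Nat) : Int) (k : Int)) 0
      = (b : Int) * (k : Int) + P.getD j 0 := by
    intro P j hj
    rw [pv_floordiv_block b k j hk hj, pv_mod_block b k j hj, PySem.List.pyGetD_natCast]
  cases encrypt with
  | true =>
      simp only [if_true]
      rw [hblock, PySem.List.pyRange_zero_nat, List.map_map]
      refine List.map_congr_left (fun j hj => ?_)
      have hjk : j < k := List.mem_range.1 hj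
      simp only [Function.comp]
      rw [hf ord j hjk, PySem.List.pyGetD_natCast]
      have hj' : j < ord.length := by omega
      rw [List.getD_eq_getElem _ _ hj']
      obtain ⟨hx0, hx1⟩ := hbd _ (List.getElem_mem hj')
      rw [PySem.List.pyGetD_eq_getElem _ _ hx0 (by rw [hblen]; exact hx1),
        hblk_get _ (by omega), PySem.List.pyGetD_eq_getElem _ _ (by omega)
          (by push_cast [ht]; omega)]
      congr 1
      omega
  | false =>
      simp only [if_false, Bool.false_eq_true]
      rw [hblock, Int.toNat_natCast,
        pvFoldConv ord k hol hbd (fun j => PySem.List.pyGetD ((t.drop (b * k)).take k) j ' ') _,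
        pvFoldConv ord k hol hbd (fun j => j) _]
      refine List.ext_getElem ?_ (fun q h1 h2 => ?_)
      · rw [pvSetFold_length, List.length_replicate, List.length_map, List.length_range]
      · have hqk : q < k := by
          have := h2
          simpa using this
        obtain ⟨j, hjk, hje, hmem⟩ := pv_ps_mem ord k hol hsurj
          (fun j => PySem.List.pyGetD ((t.drop (b * k)).take k) j ' ') q hqk
        obtain ⟨j', hjk', hje', hmem'⟩ := pv_ps_mem ord k hol hsurj (fun j => j) q hqk
        -- the two preimage indices coincide
        have hjj : j' = j := by
          have e1 : ord[j]'(by omega) = (q : Int) := by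
            rw [← List.getD_eq_getElem _ 0 (by omega)]; exact hje
          have e2 : ord[j']'(by omega) = (q : Int) := by
            rw [← List.getD_eq_getElem _ 0 (by omega)]; exact hje'
          exact (hnd.getElem_inj_iff).1 (e2.trans e1.symm)
        -- left side: the scatter wrote block[j] at q
        have hL : (pvSetFold ((List.range k).map
              (fun j => ((ord.getD j 0).toNat,
                PySem.List.pyGetD ((t.drop (b * k)).take k) (j : Int) ' ')))
              (List.replicate k ' '))[q]?
            = some (PySem.List.pyGetD ((t.drop (b * k)).take k) (j : Int) ' ') :=
          pvSetFold_getElem? _ _ _ _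
            (pv_ps_nodup ord k hol hnd hbd
              (fun j => PySem.List.pyGetD ((t.drop (b * k)).take k) j ' ')) hmem
            (by simpa using hqk)
        have hP : (pvSetFold ((List.range k).map
              (fun j => ((ord.getD j 0).toNat, (j : Int))))
              (List.replicate k (0 : Int)))[q]?
            = some ((j' : Nat) : Int) :=
          pvSetFold_getElem? _ _ _ _
            (pv_ps_nodup ord k hol hnd hbd (fun j => j)) hmem' (by simpa using hqk)
        rw [List.getElem_eq_iff h1, hL]
        congr 1
        simp only [List.getElem_map, Function.comp_apply, List.getElem_range]
        rw [hf _ q hqk, List.getD_eq_getElem?_getD, hP, Option.getD_some, hjj]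
        rw [PySem.List.pyGetD_eq_getElem _ _ (by positivity)
          (by rw [hblen]; exact_mod_cast hjk)]
        rw [PySem.List.pyGetD_eq_getElem _ _ (by positivity)
          (by rw [ht]; push_cast; exact_mod_cast (show b * k + j < n * k by omega))]
        simp only [Int.toNat_natCast]
        rw [hblk_get j hjk]
        have e : ((b : Int) * (k : Int) + (j : Int)).toNat = b * k + j := by
          rw [show ((b : Int) * (k : Int) + (j : Int)) = ((b * k + j : Nat) : Int) by
            push_cast; ring, Int.toNat_natCast]
        simp only [e]

-- ===== VERDICT (by name: the statement is the Claim_ definition above) =====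
theorem permutation_cipher_spec : Claim_equal_permutation_cipher := by
  intro text key alphabet encrypt _ hpre
  obtain ⟨hne, hnd, -⟩ := hpre
  have hofl : PySem.Set.ofList key.toList = key.toList := PySem.Set.ofList_eq_self_of_nodup _ hnd
  have hk : 0 < key.toList.length := List.length_pos_iff.2 hne
  have hlen : PySem.Set.len (PySem.Set.ofList key.toList) = (key.toList.length : Int) := by
    rw [hofl]; rfl
  obtain ⟨n, hn⟩ := pvPad_length text.toList alphabet.toList key.toList.length hk
  have hcore := pvCore
    (pvPad text.toList alphabet.toList (key.toList.length : Int) (text.toList.length : Int))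
    (pvKeyOrder key.toList alphabet.toList) key.toList.length n hk hn
    (pvKeyOrder_length _ _) (fun x hx => pvKeyOrder_mem _ _ hx) (pvKeyOrder_nodup _ _)
    (fun q hq => pvKeyOrder_surj _ _ hq) encrypt
  cases encrypt with
  | true =>
      simp only [Spec_permutation_cipher, permutation_cipher, permutation_cipher_alt, hlen,
        ne_eq, not_true_eq_false, if_false, Nat.cast_eq_zero, hk.ne']
      exact congrArg String.mk hcore
  | false =>
      simp only [Spec_permutation_cipher, permutation_cipher, permutation_cipher_alt, hlen,
        ne_eq, not_true_eq_false, if_false, Nat.cast_eq_zero, hk.ne',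
        Bool.false_eq_true]
      exact congrArg
        (fun l => String.mk (PySem.List.slice l none (some (text.toList.length : Int)))) hcore
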